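-- pv_equiv track=rewrite | github.com/iiiiin/coding-test | BOJ/S1/11057.py | asc_num
-- ===== SOURCE A (Python) =====
-- def asc_num(num):
--     dp = [[0] * 10 for _ in range(1000)]
--     for i in range(len(dp)):
--         for j in range(len(dp[0])):
--             if i == 0:
--                 dp[i][j] = 1
--             else:
--                 dp[i][j] = sum(dp[i-1][:j+1])
--         if i == num-1:
--             return sum(dp[i]) % 10007
-- ===== SOURCE B (Python) =====
-- def asc_num(num):
--     # Count of non-decreasing digit strings of length num is C(num+9, 9);
--     # computed incrementally so the division is exact at every step.
--     c = 1
--     for k in range(1, 10):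
--         c = c * (num + k) // k
--     return c % 10007
-- ===== Notes on version B (the rewrite author's own statement) =====
-- stated objective: simpler
-- what changed: Replaces the 1000x10 dynamic-programming table with the stars-and-bars closed form C(num+9,9) mod 10007, computed by a 9-step exact product.
-- outside the precondition, e.g. on asc_num(1001): A returns None, B returns 5356; on asc_num(0): A returns None, B returns 1
import Mathlib
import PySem

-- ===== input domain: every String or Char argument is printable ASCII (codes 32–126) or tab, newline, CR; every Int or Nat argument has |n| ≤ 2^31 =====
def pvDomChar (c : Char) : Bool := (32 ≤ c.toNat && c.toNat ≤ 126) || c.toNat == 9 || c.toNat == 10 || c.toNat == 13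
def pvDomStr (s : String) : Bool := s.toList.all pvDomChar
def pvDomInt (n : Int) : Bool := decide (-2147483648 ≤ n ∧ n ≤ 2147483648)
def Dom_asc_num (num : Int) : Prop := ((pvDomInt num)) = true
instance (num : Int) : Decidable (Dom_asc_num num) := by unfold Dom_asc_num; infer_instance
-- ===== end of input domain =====

-- B replaces A's 1000x10 DP table with the closed form C(num+9,9) mod 10007 (simpler).
-- A returns None (no Int) for num < 1 or num > 1000; Pre_ excludes exactly those inputs.

-- ===== PORT A =====
-- the loop 'for i in range(1000)' with early return; dp is the whole mutable table, as in A
def ascGo (num : Int) (dp : List (List Int)) (i : Nat) : Int :=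
  if _h : i < 1000 then
    let row := (List.range 10).map (fun (j : Nat) =>
      if i = 0 then (1 : Int)
      else (PySem.List.slice (dp.getD (i - 1) []) none (some (((j : Nat) : Int) + 1))).sum)
    let dp' := dp.set i row
    if (i : Int) = num - 1 then (dp'.getD i []).sum % 10007
    else ascGo num dp' (i + 1)
  else 0  -- Python loop ends without return (None); unreachable under Pre_
termination_by 1000 - i

def asc_num (num : Int) : Int :=
  ascGo num ((List.range 1000).map (fun _ => (List.range 10).map (fun _ => (0 : Int)))) 0

-- ===== PORT B =====
def asc_num_alt (num : Int) : Int :=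
  (((PySem.List.pyRange 1 10 1).foldl
      (fun c k => PySem.Int.floordiv (c * (num + k)) k) 1) % 10007)

-- ===== PRECONDITION & SPEC =====
-- Pre_ excludes num < 1 and num > 1000, on which Python A falls through and returns None, not an int.
def Pre_asc_num (num : Int) : Prop := 1 ≤ num ∧ num ≤ 1000
instance (num : Int) : Decidable (Pre_asc_num num) := by unfold Pre_asc_num; infer_instance
def pvWitness_asc_num : Int := (3)

def Spec_asc_num (num : Int) (out : Int) : Prop := out = asc_num_alt num
instance (num : Int) (out : Int) : Decidable (Spec_asc_num num out) := by unfold Spec_asc_num; infer_instance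

-- ===== CLAIM (what is proved, stated in full; the proofs are below) =====
def Claim_equal_asc_num : Prop := ∀ (num : Int), Dom_asc_num num → Pre_asc_num num → Spec_asc_num num (asc_num num)

-- ===== LEMMAS AND PROOFS =====

-- row i of A's table: dp[i][j] = C(i+j, j)
def binomRow (i : Nat) : List Int := (List.range 10).map (fun j => ((Nat.choose (i + j) j : Nat) : Int))

-- hockey-stick: sum_{t=0}^{j} C(a+t, t) = C(a+j+1, j)
theorem hockey (a j : Nat) :
    (((List.range (j + 1)).map (fun t => ((Nat.choose (a + t) t : Nat) : Int))).sum)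
      = ((Nat.choose (a + j + 1) j : Nat) : Int) := by
  induction j with
  | zero => simp
  | succ j ih =>
    rw [List.range_succ, List.map_append, List.sum_append, ih]
    simp only [List.map_cons, List.map_nil, List.sum_cons, List.sum_nil, add_zero]
    have key : Nat.choose (a + j + 1) j + Nat.choose (a + j + 1) (j + 1)
        = Nat.choose (a + j + 2) (j + 1) := (Nat.choose_succ_succ (a + j + 1) j).symm
    have e1 : a + (j + 1) = a + j + 1 := by omega
    rw [e1, show a + j + 1 + 1 = a + j + 2 from by omega, ← key]
    push_cast
    ring

theorem ascGo_eq (n : Nat) (hn : n < 1000) :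
    ∀ i dp, i ≤ n → dp.length = 1000 →
      (1 ≤ i → dp.getD (i - 1) [] = binomRow (i - 1)) →
      ascGo ((n : Int) + 1) dp i = (binomRow n).sum % 10007 := by
  intro i
  induction hm : n - i using Nat.strong_induction_on generalizing i with
  | _ m ih =>
    intro dp hi hlen hprev
    have hi1000 : i < 1000 := by omega
    rw [ascGo]
    simp only [hi1000, dif_pos]
    have hrow : ((List.range 10).map (fun (j : Nat) =>
        if i = 0 then (1 : Int)
        else (PySem.List.slice (dp.getD (i - 1) []) none (some (((j : Nat) : Int) + 1))).sum))
        = binomRow i := by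
      unfold binomRow
      apply List.map_congr_left
      intro j hj
      simp only [List.mem_range] at hj
      by_cases h0 : i = 0
      · subst h0; simp
      · have h1 : 1 ≤ i := by omega
        rw [if_neg h0, hprev h1]
        have : ((j : Int) + 1) = ((j + 1 : Nat) : Int) := by push_cast; ring
        rw [this, PySem.List.slice_to_natCast]
        unfold binomRow
        rw [← List.map_take, List.take_range, show min (j + 1) 10 = j + 1 from by omega]
        rw [hockey (i - 1) j]
        congr 2
        omega
    rw [hrow]
    have hset : (dp.set i (binomRow i)).getD i [] = binomRow i := by
      rw [List.getD_eq_getElem?_getD, List.getElem?_set_self (by omega)]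
      simp
    by_cases heq : (i : Int) = ((n : Int) + 1) - 1
    · have : i = n := by omega
      subst this
      rw [if_pos heq, hset]
    · rw [if_neg heq]
      have hin : i < n := by
        rcases Nat.lt_or_ge i n with h | h
        · exact h
        · exfalso; apply heq; have : i = n := by omega
          simp [this]
      exact ih (n - (i + 1)) (by omega) (i + 1) rfl (dp.set i (binomRow i)) (by omega)
        (by simp [hlen]) (fun _ => by simpa using hset)

-- B's loop: foldl over [1..k] computes C(num+k, k) exactly
theorem bfold (n : Nat) (k : Nat) :
    ((PySem.List.pyRange 1 (1 + (k : Int)) 1).foldl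
        (fun c kk => PySem.Int.floordiv (c * (((n : Int) + 1) + kk)) kk) 1)
      = ((Nat.choose (n + 1 + k) k : Nat) : Int) := by
  induction k with
  | zero => simp [PySem.List.pyRange]
  | succ k ih =>
    have hsplit : PySem.List.pyRange 1 (1 + ((k : Nat) + 1 : Nat) : Int) 1
        = PySem.List.pyRange 1 (1 + (k : Int)) 1 ++ [1 + (k : Int)] := by
      have h := PySem.List.pyRange_one_succ_right (a := 1) (b := 1 + (k : Int)) (by omega)
      rw [show ((1 : Int) + ((k : Nat) + 1 : Nat)) = (1 + (k : Int)) + 1 from by push_cast; ring]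
      exact h
    rw [hsplit, List.foldl_append, ih]
    simp only [List.foldl_cons, List.foldl_nil]
    have h' : (n + 1 + k + 1) * Nat.choose (n + 1 + k) k
        = Nat.choose (n + 1 + k + 1) (k + 1) * (k + 1) := by
      simpa using Nat.add_one_mul_choose_eq (n + 1 + k) k
    have hmul : ((Nat.choose (n + 1 + k) k : Nat) : Int) * (((n : Int) + 1) + (1 + (k : Int)))
        = (1 + (k : Int)) * ((Nat.choose (n + 1 + (k + 1)) (k + 1) : Nat) : Int) := by
      have hc := congrArg (fun x : Nat => (x : Int)) h'
      push_cast at hc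
      have e : n + 1 + (k + 1) = n + 1 + k + 1 := by omega
      rw [e]
      linarith [hc]
    rw [hmul, PySem.Int.floordiv_eq_ediv_of_pos (by omega : (0 : Int) < 1 + (k : Int))]
    exact Int.mul_ediv_cancel_left _ (by omega)

theorem alt_closed (n : Nat) :
    asc_num_alt ((n : Int) + 1) = ((Nat.choose (n + 10) 9 : Nat) : Int) % 10007 := by
  unfold asc_num_alt
  have h := bfold n 9
  rw [show (10 : Int) = 1 + ((9 : Nat) : Int) from by norm_num, h]

theorem binomRow_sum (n : Nat) : (binomRow n).sum = ((Nat.choose (n + 10) 9 : Nat) : Int) := by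
  unfold binomRow
  have h := hockey n 9
  rw [show (10 : Nat) = 9 + 1 from rfl, h]

-- ===== VERDICT (by name: the statement is the Claim_ definition above) =====
theorem asc_num_spec : Claim_equal_asc_num := by
  intro num _hdom hpre
  obtain ⟨h1, h2⟩ := hpre
  unfold Spec_asc_num
  obtain ⟨n, hn⟩ : ∃ n : Nat, num = (n : Int) + 1 :=
    ⟨(num - 1).toNat, by omega⟩
  subst hn
  have hn1000 : n < 1000 := by omega
  unfold asc_num
  rw [ascGo_eq n hn1000 0 _ (by omega) (by rw [List.length_map, List.length_range]) (by omega)]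
  rw [binomRow_sum, alt_closed]
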